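-- pv_equiv track=rewrite | github.com/Dan-jpg2/CSIK_Prog | modul9/v5_7.py | daily_ohlc_optimized
-- ===== SOURCE A (Python) =====
-- from itertools import groupby
-- from operator import itemgetter
--
-- def daily_ohlc_optimized(records):
--     result = []
--     for date, group in groupby(records, key=itemgetter(0)):
--         prices = [price for _, _, price in group]
--         open_ = prices[0]
--         high = max(prices)
--         low = min(prices)
--         close = prices[-1]
--         result.append((date, open_, high, low, close))
--     return result
-- ===== SOURCE B (Python) =====
-- def daily_ohlc_optimized(records):
--     result = []
--     cur = None  # (date, open, high, low, close)
--     for date, _, price in records: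
--         if cur is not None and cur[0] == date:
--             cur = (date, cur[1], max(cur[2], price), min(cur[3], price), price)
--         else:
--             if cur is not None:
--                 result.append(cur)
--             cur = (date, price, price, price, price)
--     if cur is not None:
--         result.append(cur)
--     return result
-- ===== Notes on version B (the rewrite author's own statement) =====
-- stated objective: alternative
-- what changed: Replaces groupby plus a per-group prices list scanned four times (max, min, index 0, index -1) with a single pass carrying a running (date, open, high, low, close) accumulator that is flushed when the date changes; it trades the builtin group scans for per-record updates, so it is not measurably faster.
import Mathlib
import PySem

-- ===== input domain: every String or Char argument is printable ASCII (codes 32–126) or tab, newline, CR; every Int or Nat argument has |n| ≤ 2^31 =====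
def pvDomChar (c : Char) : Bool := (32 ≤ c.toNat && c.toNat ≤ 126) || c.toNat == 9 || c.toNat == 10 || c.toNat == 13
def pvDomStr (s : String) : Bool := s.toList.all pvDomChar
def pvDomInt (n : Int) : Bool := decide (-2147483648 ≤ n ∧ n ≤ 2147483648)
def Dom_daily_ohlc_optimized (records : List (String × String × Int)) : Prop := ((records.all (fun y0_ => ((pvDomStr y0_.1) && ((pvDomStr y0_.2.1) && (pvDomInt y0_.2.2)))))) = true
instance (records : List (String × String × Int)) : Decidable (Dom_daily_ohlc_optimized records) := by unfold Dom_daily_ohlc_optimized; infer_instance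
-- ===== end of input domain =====

-- B replaces groupby + a per-group prices list scanned four times by one pass with a
-- running (date, open, high, low, close) accumulator flushed on date change (objective: alternative decomposition).

-- ===== PORT A =====
-- groupby(records, key=itemgetter(0)) yields consecutive runs of equal first components:
-- here the run after the head record is takeWhile / dropWhile on key equality.
def daily_ohlc_optimized (records : List (String × String × Int)) : List (String × Int × Int × Int × Int) :=
  match records with
  | [] => []
  | (d, _, p) :: rest =>
    let grp := rest.takeWhile (fun r => r.1 == d)
    let prices : List Int := p :: grp.map (fun r => r.2.2)
    let open_ := prices.headD 0            -- prices[0]; prices is nonempty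
    let high := (PySem.List.max? prices (fun x => x)).getD 0   -- max(prices); nonempty
    let low := (PySem.List.min? prices (fun x => x)).getD 0    -- min(prices); nonempty
    let close := prices.getLastD 0         -- prices[-1]; nonempty
    (d, open_, high, low, close) :: daily_ohlc_optimized (rest.dropWhile (fun r => r.1 == d))
termination_by records.length
decreasing_by
  simp only [List.length_cons]
  exact Nat.lt_succ_of_le (List.length_dropWhile_le _ _)

-- ===== PORT B =====
def ohlcGo (cur : String × Int × Int × Int × Int) : List (String × String × Int) → List (String × Int × Int × Int × Int)
  | [] => [cur]
  | (d, _, p) :: rest =>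
    if cur.1 == d then
      ohlcGo (cur.1, cur.2.1, max cur.2.2.1 p, min cur.2.2.2.1 p, p) rest
    else
      cur :: ohlcGo (d, p, p, p, p) rest

def daily_ohlc_optimized_alt (records : List (String × String × Int)) : List (String × Int × Int × Int × Int) :=
  match records with
  | [] => []
  | (d, _, p) :: rest => ohlcGo (d, p, p, p, p) rest

-- ===== PRECONDITION & SPEC =====
def Spec_daily_ohlc_optimized (records : List (String × String × Int)) (out : List (String × Int × Int × Int × Int)) : Prop := out = daily_ohlc_optimized_alt records
instance (records : List (String × String × Int)) (out : List (String × Int × Int × Int × Int)) : Decidable (Spec_daily_ohlc_optimized records out) := by unfold Spec_daily_ohlc_optimized; infer_instance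

-- ===== CLAIM (what is proved, stated in full; the proofs are below) =====
def Claim_equal_daily_ohlc_optimized : Prop := ∀ (records : List (String × String × Int)), Dom_daily_ohlc_optimized records → Spec_daily_ohlc_optimized records (daily_ohlc_optimized records)

-- ===== LEMMAS AND PROOFS =====

-- the fold that keeps only the last element is getLastD of the cons
lemma foldl_last (t : List Int) : ∀ c : Int, t.foldl (fun _ x => x) c = (c :: t).getLastD 0 := by
  induction t with
  | nil => intro c; simp
  | cons x xs ih => intro c; simpa using ih x

-- B's inner loop, characterised by A's group decomposition
lemma ohlcGo_eq (rest : List (String × String × Int)) :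
    ∀ (d : String) (o h l c : Int),
    ohlcGo (d, o, h, l, c) rest =
      (d, o,
        (rest.takeWhile (fun r => r.1 == d)).foldl (fun a r => max a r.2.2) h,
        (rest.takeWhile (fun r => r.1 == d)).foldl (fun a r => min a r.2.2) l,
        (rest.takeWhile (fun r => r.1 == d)).foldl (fun _ r => r.2.2) c)
      :: daily_ohlc_optimized_alt (rest.dropWhile (fun r => r.1 == d)) := by
  induction rest with
  | nil => intro d o h l c; simp [ohlcGo, daily_ohlc_optimized_alt]
  | cons r t ih =>
    intro d o h l c
    obtain ⟨d', s', p⟩ := r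
    by_cases hd : d' = d
    · subst hd
      simp only [ohlcGo, List.takeWhile_cons, List.dropWhile_cons, beq_self_eq_true, if_true]
      simpa [List.foldl_cons] using ih d' o (max h p) (min l p) p
    · have hb : (d == d') = false := beq_eq_false_iff_ne.mpr (fun h => hd h.symm)
      have hb' : ((d', s', p).1 == d) = false := beq_eq_false_iff_ne.mpr hd
      simp only [ohlcGo, hb, List.takeWhile_cons, hb', if_false, Bool.false_eq_true,
        List.dropWhile_cons, List.foldl_nil]
      rfl

lemma main_eq (records : List (String × String × Int)) :
    daily_ohlc_optimized records = daily_ohlc_optimized_alt records := by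
  induction records using daily_ohlc_optimized.induct with
  | case1 => simp [daily_ohlc_optimized, daily_ohlc_optimized_alt]
  | case2 d s p rest ih =>
    rw [daily_ohlc_optimized]
    rw [daily_ohlc_optimized_alt, ohlcGo_eq]
    set grp := List.takeWhile (fun r : String × String × Int => r.1 == d) rest with hgrp
    have hmax : (PySem.List.max? (p :: grp.map (fun r => r.2.2)) (fun x => x)).getD 0
        = grp.foldl (fun a r => max a r.2.2) p := by
      rw [PySem.List.max?_id_cons]
      simp [List.foldl_map]
    have hmin : (PySem.List.min? (p :: grp.map (fun r => r.2.2)) (fun x => x)).getD 0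
        = grp.foldl (fun a r => min a r.2.2) p := by
      rw [PySem.List.min?_id_cons]
      simp [List.foldl_map]
    have hlast : (p :: grp.map (fun r => r.2.2)).getLastD 0
        = grp.foldl (fun _ r => r.2.2) p := by
      rw [← foldl_last]
      simp [List.foldl_map]
    simp only [hmax, hmin, ← hlast, ih, List.headD_cons]

-- ===== VERDICT (by name: the statement is the Claim_ definition above) =====
theorem daily_ohlc_optimized_spec : Claim_equal_daily_ohlc_optimized := by
  intro records _
  unfold Spec_daily_ohlc_optimized
  exact main_eq records
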